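-- pv_equiv track=rewrite | github.com/webb-c/Problem-solving | 백준/Silver/11052. 카드 구매하기/카드 구매하기.py | get_max_cost
-- ===== SOURCE A (Python) =====
-- def get_max_cost(N, cost_list):
--     DP = [0] * (N+1)
--     DP[1] = cost_list[0]
--
--     for i in range(2, N+1):
--         max_cost = cost_list[i-1]
--         for j in range(i//2 + 1):
--             max_cost = max(max_cost, DP[j]+DP[i-j])
--
--         DP[i] = max_cost
--
--     return DP[-1]
-- ===== SOURCE B (Python) =====
-- def get_max_cost(N, cost_list):
--     # DP[i] = best total price achievable with i cards; grown by appending,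
--     # each new entry = best of "take one pack of k cards plus the best for the
--     # rest" over k = 1..i, floored at 0 (an entry never goes below the empty choice).
--     DP = [0, cost_list[0]]
--     while len(DP) <= N:
--         i = len(DP)
--         DP.append(max([0] + [DP[i - k] + cost_list[k - 1] for k in range(1, i + 1)]))
--     return DP[N]
-- ===== Notes on version B (the rewrite author's own statement) =====
-- stated objective: alternative
-- what changed: Replaces A's pre-sized index-assigned table with a symmetric two-halves split transition (max over j<=i//2 of DP[j]+DP[i-j]) by a list grown by appending, each new entry computed as the max of a one-pack-plus-remainder comprehension (DP[i-k]+cost_list[k-1] for k=1..i, floored at 0), returning DP[N] directly.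
import Mathlib
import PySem

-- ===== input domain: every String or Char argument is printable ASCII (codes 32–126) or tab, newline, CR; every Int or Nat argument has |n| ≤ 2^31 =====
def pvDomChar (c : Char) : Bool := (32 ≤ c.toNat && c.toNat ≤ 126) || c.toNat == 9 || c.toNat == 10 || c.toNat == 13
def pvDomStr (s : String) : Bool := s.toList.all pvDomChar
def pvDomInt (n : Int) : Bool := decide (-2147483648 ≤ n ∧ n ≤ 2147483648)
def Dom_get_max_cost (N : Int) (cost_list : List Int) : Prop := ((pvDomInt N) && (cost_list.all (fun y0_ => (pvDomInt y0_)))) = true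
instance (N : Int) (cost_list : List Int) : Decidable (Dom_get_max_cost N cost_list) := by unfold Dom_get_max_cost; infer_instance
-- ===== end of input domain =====

-- B replaces A's index-written DP table with symmetric two-halves split transitions
-- by a list grown by appending, each entry the max of a one-pack-plus-remainder
-- comprehension; same results, similar cost.

-- ===== PORT A =====
def get_max_cost (N : Int) (cost_list : List Int) : Int :=
  let DP : List Int := List.replicate (N+1).toNat 0                      -- DP = [0] * (N+1)
  let DP := PySem.List.pySetD DP 1 (PySem.List.pyGetD cost_list 0 0)     -- DP[1] = cost_list[0]
  let DP := (PySem.List.pyRange 2 (N+1) 1).foldl (fun DP i =>            -- for i in range(2, N+1):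
      let max_cost := PySem.List.pyGetD cost_list (i-1) 0                --   max_cost = cost_list[i-1]
      let max_cost := (PySem.List.pyRange 0 (PySem.Int.floordiv i 2 + 1) 1).foldl
          (fun m j => max m (PySem.List.pyGetD DP j 0 + PySem.List.pyGetD DP (i-j) 0)) max_cost
                                                                         --   for j in range(i//2+1): max_cost = max(max_cost, DP[j]+DP[i-j])
      PySem.List.pySetD DP i max_cost) DP                                --   DP[i] = max_cost
  PySem.List.pyGetD DP (-1) 0                                            -- return DP[-1]

-- ===== PORT B =====
-- max([0] + [DP[i-k] + cost_list[k-1] for k in range(1, i+1)]) with i = len(DP).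
-- i = len(DP) is a Nat, so range(1, i+1) is exactly List.range' 1 i; DP[i-k] with
-- 1 ≤ k ≤ i is always in range and cost_list[k-1] is in range under Pre_, so the
-- getD defaults are never taken on admitted inputs.
def altStep (c : List Int) (DP : List Int) : Int :=
  let i := DP.length
  ((PySem.List.max? (0 :: (List.range' 1 i).map
      (fun k => DP.getD (i - k) 0 + c.getD (k - 1) 0)) (fun y => y)).getD 0)

-- while len(DP) <= N: DP.append(altStep)
def altLoop (N : Int) (c : List Int) (DP : List Int) : List Int :=
  if (DP.length : Int) ≤ N then altLoop N c (DP ++ [altStep c DP]) else DP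
termination_by (N + 1 - DP.length).toNat
decreasing_by simp only [List.length_append, List.length_cons, List.length_nil]; omega

def get_max_cost_alt (N : Int) (cost_list : List Int) : Int :=
  PySem.List.pyGetD
    (altLoop N cost_list [0, PySem.List.pyGetD cost_list 0 0])           -- DP = [0, cost_list[0]]; while loop
    N 0                                                                  -- return DP[N]

-- ===== PRECONDITION & SPEC =====
-- Exactly the inputs on which the Python A returns: otherwise DP[1] = cost_list[0]
-- or cost_list[i-1] raises IndexError.
def Pre_get_max_cost (N : Int) (cost_list : List Int) : Prop :=
  1 ≤ N ∧ N ≤ cost_list.length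
instance (N : Int) (cost_list : List Int) : Decidable (Pre_get_max_cost N cost_list) := by
  unfold Pre_get_max_cost; infer_instance

def pvWitness_get_max_cost : Int × List Int := (4, [1, 5, 6, 7])

def Spec_get_max_cost (N : Int) (cost_list : List Int) (out : Int) : Prop := out = get_max_cost_alt N cost_list
instance (N : Int) (cost_list : List Int) (out : Int) : Decidable (Spec_get_max_cost N cost_list out) := by unfold Spec_get_max_cost; infer_instance

-- ===== CLAIM (what is proved, stated in full; the proofs are below) =====
def Claim_equal_get_max_cost : Prop := ∀ (N : Int) (cost_list : List Int), Dom_get_max_cost N cost_list → Pre_get_max_cost N cost_list → Spec_get_max_cost N cost_list (get_max_cost N cost_list)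

-- ===== LEMMAS AND PROOFS =====

theorem pvFoldMaxLe {α : Type} (f : α → Int) (b : Int) :
    ∀ (xs : List α) (init : Int), init ≤ b → (∀ x ∈ xs, f x ≤ b) →
      xs.foldl (fun m x => max m (f x)) init ≤ b := by
  intro xs
  induction xs with
  | nil => intro init h _; simpa using h
  | cons y t ih =>
    intro init h hall
    simp only [List.foldl_cons]
    exact ih _ (max_le h (hall y (by simp))) (fun x hx => hall x (by simp [hx]))

theorem pvFoldMaxCases {α : Type} (f : α → Int) :
    ∀ (xs : List α) (init : Int),
      xs.foldl (fun m x => max m (f x)) init = init ∨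
      ∃ x ∈ xs, xs.foldl (fun m x => max m (f x)) init = f x := by
  intro xs
  induction xs with
  | nil => intro init; left; rfl
  | cons y t ih =>
    intro init
    simp only [List.foldl_cons]
    rcases ih (max init (f y)) with h | ⟨x, hx, hres⟩
    · rcases max_choice init (f y) with hm | hm
      · left; rw [h, hm]
      · right; exact ⟨y, by simp, by rw [h, hm]⟩
    · right; exact ⟨x, by simp [hx], hres⟩

def pvStepA (c D : List Int) (i : Nat) : Int :=
  (List.range (i/2+1)).foldl (fun m j => max m (D.getD j 0 + D.getD (i-j) 0)) (c.getD (i-1) 0)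

def pvTab (c : List Int) : Nat → List Int
  | 0 => [0]
  | 1 => [0, c.getD 0 0]
  | (n+2) => pvTab c (n+1) ++ [pvStepA c (pvTab c (n+1)) (n+2)]

def pvVal (c : List Int) (i : Nat) : Int := (pvTab c i).getD i 0

theorem pvTab_length (c : List Int) : ∀ n, (pvTab c n).length = n + 1 := by
  intro n
  induction n with
  | zero => rfl
  | succ m ih =>
    match m, ih with
    | 0, _ => rfl
    | (k+1), ih => simp [pvTab, ih]

theorem pvTab_getD (c : List Int) : ∀ n i, i ≤ n → (pvTab c n).getD i 0 = pvVal c i := by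
  intro n
  induction n with
  | zero => intro i hi; interval_cases i; rfl
  | succ m ih =>
    intro i hi
    match m, ih with
    | 0, _ =>
      interval_cases i <;> rfl
    | (k+1), ih =>
      show (pvTab c (k+1) ++ [_]).getD i 0 = pvVal c i
      rcases Nat.lt_or_ge i (k+2) with h | h
      · rw [List.getD_append _ _ _ _ (by rw [pvTab_length]; omega)]
        exact ih i (by omega)
      · have : i = k + 2 := by omega
        subst this
        rfl

theorem pvTab_getD_hi (c : List Int) (n i : Nat) (h : n < i) : (pvTab c n).getD i 0 = 0 := by
  apply List.getD_eq_default
  rw [pvTab_length]; omega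

theorem pvVal_succ (c : List Int) (n : Nat) :
    pvVal c (n+2) = pvStepA c (pvTab c (n+1)) (n+2) := by
  show (pvTab c (n+1) ++ [_]).getD (n+2) 0 = _
  rw [List.getD_append_right _ _ _ _ (by rw [pvTab_length])]
  simp [pvTab_length]

def pvRstep (c : List Int) (i : Nat) : Int :=
  (List.range i).foldl (fun m t => max m (pvVal c (i-1-t) + c.getD t 0)) 0

theorem pvVal_zero (c : List Int) : pvVal c 0 = 0 := rfl

theorem pvVal_one (c : List Int) : pvVal c 1 = c.getD 0 0 := rfl

theorem pvVal_nonneg (c : List Int) (i : Nat) (h : i ≠ 1) : 0 ≤ pvVal c i := by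
  match i, h with
  | 0, _ => exact le_refl 0
  | (n+2), _ =>
    rw [pvVal_succ]
    unfold pvStepA
    have hm : (0:Nat) ∈ List.range ((n+2)/2+1) := by simp
    have h2 := (PySem.List.le_foldl_max_int (List.range ((n+2)/2+1))
      (fun j => (pvTab c (n+1)).getD j 0 + (pvTab c (n+1)).getD ((n+2)-j) 0)
      (c.getD ((n+2)-1) 0)).2 0 hm
    have h0 : (pvTab c (n+1)).getD 0 0 + (pvTab c (n+1)).getD ((n+2)-0) 0 = 0 := by
      rw [pvTab_getD c (n+1) 0 (by omega), pvTab_getD_hi c (n+1) ((n+2)-0) (by omega)]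
      rfl
    calc (0:Int) = _ := h0.symm
    _ ≤ _ := h2

theorem pvVal_cost (c : List Int) (i : Nat) (h : 1 ≤ i) : c.getD (i-1) 0 ≤ pvVal c i := by
  match i, h with
  | 1, _ => exact le_refl _
  | (n+2), _ =>
    rw [pvVal_succ]
    unfold pvStepA
    exact (PySem.List.le_foldl_max_int _ _ _).1

theorem pvVal_super_le (c : List Int) (a b : Nat) (ha : 1 ≤ a) (hab : a ≤ b) :
    pvVal c a + pvVal c b ≤ pvVal c (a+b) := by
  obtain ⟨m, hm⟩ : ∃ m, a + b = m + 2 := ⟨a+b-2, by omega⟩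
  rw [hm, pvVal_succ]
  unfold pvStepA
  have hmem : a ∈ List.range ((m+2)/2+1) := by
    simp only [List.mem_range]; omega
  have h2 := (PySem.List.le_foldl_max_int (List.range ((m+2)/2+1))
    (fun j => (pvTab c (m+1)).getD j 0 + (pvTab c (m+1)).getD ((m+2)-j) 0)
    (c.getD ((m+2)-1) 0)).2 a hmem
  have hv : (pvTab c (m+1)).getD a 0 + (pvTab c (m+1)).getD ((m+2)-a) 0
      = pvVal c a + pvVal c b := by
    have e1 : (m+2) - a = b := by omega
    rw [e1, pvTab_getD c (m+1) a (by omega), pvTab_getD c (m+1) b (by omega)]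
  calc pvVal c a + pvVal c b = _ := hv.symm
  _ ≤ _ := h2

theorem pvVal_super (c : List Int) (a b : Nat) (ha : 1 ≤ a) (hb : 1 ≤ b) :
    pvVal c a + pvVal c b ≤ pvVal c (a+b) := by
  rcases le_total a b with h | h
  · exact pvVal_super_le c a b ha h
  · have := pvVal_super_le c b a hb h
    rw [Nat.add_comm b a] at this
    linarith

theorem pvVal_mono (c : List Int) (u v : Nat) (h : u + 2 ≤ v) : pvVal c u ≤ pvVal c v := by
  rcases Nat.eq_zero_or_pos u with rfl | hu
  · exact pvVal_nonneg c v (by omega)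
  · have h1 : 0 ≤ pvVal c (v-u) := pvVal_nonneg c (v-u) (by omega)
    have h2 := pvVal_super c u (v-u) hu (by omega)
    have e : u + (v-u) = v := by omega
    rw [e] at h2
    linarith

theorem pvVal_eq_Rstep (c : List Int) : ∀ i, 2 ≤ i → pvVal c i = pvRstep c i := by
  intro i
  induction i using Nat.strong_induction_on with
  | _ i IH =>
    intro hi
    obtain ⟨n, rfl⟩ : ∃ n, i = n + 2 := ⟨i-2, by omega⟩
    have Rterm : ∀ t ∈ List.range (n+2),
        pvVal c ((n+2)-1-t) + c.getD t 0 ≤ pvRstep c (n+2) :=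
      (PySem.List.le_foldl_max_int (List.range (n+2))
        (fun t => pvVal c ((n+2)-1-t) + c.getD t 0) 0).2
    have Rpos : (0:Int) ≤ pvRstep c (n+2) :=
      (PySem.List.le_foldl_max_int (List.range (n+2))
        (fun t => pvVal c ((n+2)-1-t) + c.getD t 0) 0).1
    apply le_antisymm
    · -- pvVal ≤ pvRstep
      rw [pvVal_succ]
      unfold pvStepA
      apply pvFoldMaxLe
      · -- init = c.getD (n+1) 0, the t = n+1 term of pvRstep
        have h := Rterm (n+1) (by simp)
        have e : (n+2)-1-(n+1) = 0 := by omega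
        rw [e, pvVal_zero, zero_add] at h
        exact h
      · intro j hj
        simp only [List.mem_range] at hj
        have hj2 : j ≤ (n+2)/2 := by omega
        rcases Nat.eq_zero_or_pos j with rfl | hj1
        · -- j = 0 : term is pvVal 0 + 0 = 0
          rw [pvTab_getD c (n+1) 0 (by omega), pvTab_getD_hi c (n+1) ((n+2)-0) (by omega)]
          simpa using Rpos
        rcases Nat.eq_or_lt_of_le hj1 with rfl | hj1'
        · -- j = 1 : term is c.getD 0 0 + pvVal (n+1) = Rstep term t = 0
          rw [pvTab_getD c (n+1) 1 (by omega), pvTab_getD c (n+1) ((n+2)-1) (by omega)]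
          have h := Rterm 0 (by simp)
          have e : (n+2)-1-0 = (n+2)-1 := by omega
          rw [e] at h
          calc pvVal c 1 + pvVal c ((n+2)-1) = pvVal c ((n+2)-1) + c.getD 0 0 := by
                rw [pvVal_one]; ring
          _ ≤ _ := h
        · -- 2 ≤ j
          have hjn : 2 ≤ j := hj1'
          have hij : 2 ≤ (n+2) - j := by omega
          rw [pvTab_getD c (n+1) j (by omega), pvTab_getD c (n+1) ((n+2)-j) (by omega)]
          have hR2 := IH ((n+2)-j) (by omega) hij
          rcases pvFoldMaxCases (fun t => pvVal c (((n+2)-j)-1-t) + c.getD t 0)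
              (List.range ((n+2)-j)) 0 with hc | ⟨t, ht, hc⟩
          · -- pvVal ((n+2)-j) = 0
            have hz : pvVal c ((n+2)-j) = 0 := by rw [hR2]; exact hc
            rw [hz, add_zero]
            -- bound pvVal c j
            have hRj := IH j (by omega) hjn
            rcases pvFoldMaxCases (fun t => pvVal c (j-1-t) + c.getD t 0)
                (List.range j) 0 with hcj | ⟨t, ht, hcj⟩
            · have : pvVal c j = 0 := by rw [hRj]; exact hcj
              rw [this]; exact Rpos
            · simp only [List.mem_range] at ht
              have hvj : pvVal c j = pvVal c (j-1-t) + c.getD t 0 := by rw [hRj]; exact hcj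
              have hmono : pvVal c (j-1-t) ≤ pvVal c ((n+2)-1-t) := by
                apply pvVal_mono; omega
              have h := Rterm t (by simp; omega)
              calc pvVal c j = pvVal c (j-1-t) + c.getD t 0 := hvj
              _ ≤ pvVal c ((n+2)-1-t) + c.getD t 0 := by linarith
              _ ≤ _ := h
          · -- pvVal ((n+2)-j) = pvVal ((n+2)-j-1-t) + c.getD t 0
            simp only [List.mem_range] at ht
            have hv2 : pvVal c ((n+2)-j) = pvVal c (((n+2)-j)-1-t) + c.getD t 0 := by
              rw [hR2]; exact hc
            have h := Rterm t (by simp; omega)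
            have key : pvVal c j + pvVal c (((n+2)-j)-1-t) ≤ pvVal c ((n+2)-1-t) := by
              rcases Nat.eq_zero_or_pos (((n+2)-j)-1-t) with hz | hpos
              · have e : (n+2)-1-t = j := by omega
                rw [hz, pvVal_zero, add_zero, e]
              · have hs := pvVal_super c j (((n+2)-j)-1-t) (by omega) hpos
                have e : j + (((n+2)-j)-1-t) = (n+2)-1-t := by omega
                rw [e] at hs
                exact hs
            calc pvVal c j + pvVal c ((n+2)-j)
                = pvVal c j + pvVal c (((n+2)-j)-1-t) + c.getD t 0 := by rw [hv2]; ring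
            _ ≤ pvVal c ((n+2)-1-t) + c.getD t 0 := by linarith
            _ ≤ _ := h
    · -- pvRstep ≤ pvVal
      unfold pvRstep
      apply pvFoldMaxLe
      · exact pvVal_nonneg c (n+2) (by omega)
      · intro t ht
        simp only [List.mem_range] at ht
        rcases Nat.eq_or_lt_of_le (Nat.le_of_lt_succ ht) with rfl | ht'
        · have e : (n+2)-1-(n+1) = 0 := by omega
          rw [e, pvVal_zero, zero_add]
          have := pvVal_cost c (n+2) (by omega)
          simpa using this
        · have h1 : c.getD t 0 ≤ pvVal c (t+1) := by
            have := pvVal_cost c (t+1) (by omega)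
            simpa using this
          have h2 := pvVal_super c ((n+2)-1-t) (t+1) (by omega) (by omega)
          have e : (n+2)-1-t + (t+1) = n+2 := by omega
          rw [e] at h2
          linarith

theorem pv_getD_append_zeros (l : List Int) (z idx : Nat) :
    (l ++ List.replicate z 0).getD idx 0 = l.getD idx 0 := by
  rcases Nat.lt_or_ge idx l.length with h | h
  · exact List.getD_append _ _ _ _ h
  · rw [List.getD_eq_default _ _ h, List.getD_append_right _ _ _ _ h]
    rcases Nat.lt_or_ge (idx - l.length) z with h2 | h2
    · rw [List.getD_replicate _ h2]
    · rw [List.getD_eq_default _ _ (by simpa using h2)]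

theorem pvStepA_append_zeros (c : List Int) (m z i : Nat) :
    pvStepA c (pvTab c m ++ List.replicate z 0) i = pvStepA c (pvTab c m) i := by
  unfold pvStepA
  apply PySem.List.foldl_congr_mem
  intro acc x _
  rw [pv_getD_append_zeros, pv_getD_append_zeros]

theorem pvTab_succ (c : List Int) (m : Nat) (hm : 1 ≤ m) :
    pvTab c (m+1) = pvTab c m ++ [pvStepA c (pvTab c m) (m+1)] := by
  obtain ⟨p, rfl⟩ : ∃ p, m = p + 1 := ⟨m-1, by omega⟩
  rfl

theorem portA_fold (c : List Int) (n : Nat) :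
    ∀ i : Nat, 1 ≤ i → i ≤ n →
      (PySem.List.pyRange 2 ((i:Int)+1) 1).foldl (fun DP i =>
          let max_cost := PySem.List.pyGetD c (i-1) 0
          let max_cost := (PySem.List.pyRange 0 (PySem.Int.floordiv i 2 + 1) 1).foldl
              (fun m j => max m (PySem.List.pyGetD DP j 0 + PySem.List.pyGetD DP (i-j) 0)) max_cost
          PySem.List.pySetD DP i max_cost)
        (pvTab c 1 ++ List.replicate (n-1) 0)
      = pvTab c i ++ List.replicate (n-i) 0 := by
  intro i
  induction i with
  | zero => omega
  | succ m ihm =>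
    intro h1 hle
    rcases Nat.eq_zero_or_pos m with rfl | hm
    · -- i = 1 : empty range
      rw [PySem.List.pyRange_one_eq_nil (by norm_num)]
      rfl
    · -- i = m+1, m ≥ 1
      have hsplit : PySem.List.pyRange 2 (((m+1:Nat):Int)+1) 1
          = PySem.List.pyRange 2 ((m:Int)+1) 1 ++ [((m:Int)+1)] := by
        have : (((m+1:Nat):Int)+1) = ((m:Int)+1) + 1 := by push_cast; ring
        rw [this, PySem.List.pyRange_one_succ_right (by exact_mod_cast by omega : (2:Int) ≤ (m:Int)+1)]
      rw [hsplit, List.foldl_append, ihm (by omega) (by omega)]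
      simp only [List.foldl_cons, List.foldl_nil]
      have e0 : ((m:Int)) + 1 = ((m+1 : Nat) : Int) := by push_cast; ring
      rw [e0]
      set DP := pvTab c m ++ List.replicate (n-m) 0 with hDP
      show PySem.List.pySetD DP ((m+1:Nat):Int) _ = _
      have hidx1 : ((m+1:Nat):Int) - 1 = ((m:Nat):Int) := by push_cast; ring
      have hfd : PySem.Int.floordiv ((m+1:Nat):Int) 2 + 1 = (((m+1)/2 + 1 : Nat) : Int) := by
        have := PySem.Int.floordiv_natCast (m+1) 2
        push_cast at this ⊢
        rw [this]
      have hinner : (PySem.List.pyRange 0 (PySem.Int.floordiv ((m+1:Nat):Int) 2 + 1) 1).foldl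
            (fun m' j => max m' (PySem.List.pyGetD DP j 0 + PySem.List.pyGetD DP (((m+1:Nat):Int)-j) 0))
            (PySem.List.pyGetD c (((m+1:Nat):Int)-1) 0)
          = pvStepA c DP (m+1) := by
        rw [hidx1, PySem.List.pyGetD_natCast, hfd, PySem.List.pyRange_one, List.foldl_map]
        have harg : ((((m+1)/2+1 : Nat):Int) - 0).toNat = (m+1)/2 + 1 := by omega
        rw [harg]
        unfold pvStepA
        apply PySem.List.foldl_congr_mem
        intro acc k hk
        simp only [List.mem_range] at hk
        have e1 : ((0:Int) + (k:Int)) = ((k:Nat):Int) := by ring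
        have e2 : (((m+1:Nat)):Int) - ((k:Nat):Int) = (((m+1-k : Nat)):Int) := by
          push_cast; omega
        rw [e1, e2, PySem.List.pyGetD_natCast, PySem.List.pyGetD_natCast]
      simp only [hinner]
      rw [hDP, pvStepA_append_zeros]
      rw [PySem.List.pySetD_natCast]
      have hlen : (pvTab c m).length = m + 1 := pvTab_length c m
      rw [List.set_append_right _ _ (by omega)]
      have e3 : m + 1 - (pvTab c m).length = 0 := by omega
      rw [e3]
      have e4 : List.replicate (n-m) (0:Int) = 0 :: List.replicate (n-(m+1)) 0 := by
        have : n - m = (n - (m+1)) + 1 := by omega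
        rw [this, List.replicate_succ]
      rw [e4]
      show pvTab c m ++ (pvStepA c (pvTab c m) (m+1) :: List.replicate (n-(m+1)) 0) = _
      rw [pvTab_succ c m hm]
      simp

-- B's appended entry at i = m+1 is exactly the one-pack recurrence pvRstep
theorem altStep_tab (c : List Int) (m : Nat) :
    altStep c (pvTab c m) = pvRstep c (m+1) := by
  unfold altStep
  simp only [pvTab_length, PySem.List.max?_id_cons, Option.getD_some]
  rw [List.range'_eq_map_range, List.foldl_map, List.foldl_map]
  unfold pvRstep
  apply PySem.List.foldl_congr_mem
  intro acc t ht
  simp only [List.mem_range] at ht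
  have e1 : m + 1 - (1 + t) = m - t := by omega
  have e2 : 1 + t - 1 = t := by omega
  have e3 : m + 1 - 1 - t = m - t := by omega
  rw [e1, e2, e3, pvTab_getD c m (m-t) (by omega)]

theorem altLoop_tab (c : List Int) (n : Nat) :
    ∀ d m, 1 ≤ m → m + d = n → altLoop (n:Int) c (pvTab c m) = pvTab c n := by
  intro d
  induction d with
  | zero =>
    intro m h1 h2
    rw [altLoop]
    rw [if_neg (by rw [pvTab_length]; omega)]
    rw [show m = n by omega]
  | succ k ih =>
    intro m h1 h2
    rw [altLoop]
    rw [if_pos (by rw [pvTab_length]; exact_mod_cast by omega)]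
    have hstep : pvTab c m ++ [altStep c (pvTab c m)] = pvTab c (m+1) := by
      rw [altStep_tab c m, ← pvVal_eq_Rstep c (m+1) (by omega)]
      obtain ⟨p, rfl⟩ : ∃ p, m = p + 1 := ⟨m-1, by omega⟩
      rw [pvTab_succ c (p+1) (by omega), pvVal_succ]
    rw [hstep]
    exact ih (m+1) (by omega) (by omega)

theorem pv_init_eq (c : List Int) (n : Nat) (hn : 1 ≤ n) :
    PySem.List.pySetD (List.replicate (((n:Int)+1).toNat) (0:Int)) 1 (PySem.List.pyGetD c 0 0)
      = pvTab c 1 ++ List.replicate (n-1) 0 := by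
  have e1 : ((n:Int)+1).toNat = n + 1 := by omega
  rw [e1]
  have e2 : (1:Int) = ((1:Nat):Int) := by norm_num
  rw [e2, PySem.List.pySetD_natCast, PySem.List.pyGetD_zero]
  obtain ⟨p, rfl⟩ : ∃ p, n = p + 1 := ⟨n-1, by omega⟩
  show (0 :: 0 :: List.replicate p (0:Int)).set 1 (c.getD 0 0) = _
  simp [pvTab]

theorem portA_val (c : List Int) (n : Nat) (hn : 1 ≤ n) :
    get_max_cost (n : Int) c = pvVal c n := by
  show PySem.List.pyGetD _ (-1) 0 = pvVal c n
  rw [pv_init_eq c n hn, portA_fold c n n hn (le_refl n)]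
  have e : n - n = 0 := by omega
  rw [e]
  simp only [List.replicate_zero, List.append_nil]
  have hlen : (pvTab c n).length = n + 1 := pvTab_length c n
  have e1 : (-1 : Int) = -((1:Nat):Int) := by norm_num
  rw [e1, PySem.List.pyGetD_neg_natCast _ 1 0 (by omega) (by omega)]
  have e2 : (pvTab c n).length - 1 = n := by omega
  have h3 : (pvTab c n)[(pvTab c n).length - 1]'(by omega) = (pvTab c n).getD ((pvTab c n).length - 1) 0 := by
    rw [List.getD_eq_getElem _ _ (by omega)]
  rw [h3, e2]
  rfl

theorem portB_val (c : List Int) (n : Nat) (hn : 1 ≤ n) :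
    get_max_cost_alt (n : Int) c = pvVal c n := by
  show PySem.List.pyGetD (altLoop (n:Int) c [0, PySem.List.pyGetD c 0 0]) ((n:Nat):Int) 0 = pvVal c n
  have hinit : [0, PySem.List.pyGetD c 0 0] = pvTab c 1 := by
    rw [PySem.List.pyGetD_zero]; rfl
  rw [hinit, altLoop_tab c n (n-1) 1 (le_refl 1) (by omega), PySem.List.pyGetD_natCast]
  rfl

-- ===== VERDICT (by name: the statement is the Claim_ definition above) =====
theorem get_max_cost_spec : Claim_equal_get_max_cost := by
  intro N c _ hPre
  unfold Spec_get_max_cost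
  obtain ⟨h1, _⟩ := hPre
  have hn : N = ((N.toNat : Nat) : Int) := by omega
  have h1' : 1 ≤ N.toNat := by omega
  rw [hn, portA_val c N.toNat h1', portB_val c N.toNat h1']
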